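-- pv_equiv track=rewrite | github.com/pypi-data/pypi-code-122 | orfpp/OrfPP-1.0-py3-none-any.whl/funcs.py | IndexE
-- ===== SOURCE A (Python) =====
-- def IndexE (seq, codon):
-- 	"""return all the positions of codon (eg. AUG, NUG)"""
-- 	OutArr = []
-- 	posHit = 0
-- 	posStart = -1
-- 	while posHit>=0:
-- 		posHit = seq.find(codon, posStart+1)
-- 		posStart = posHit
-- 		OutArr.append(posHit)
-- 	return OutArr
-- ===== SOURCE B (Python) =====
-- def IndexE(seq, codon):
--     """return all the positions of codon (eg. AUG, NUG)"""
--     out = [i for i in range(len(seq) + 1) if seq.startswith(codon, i)]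
--     out.append(-1)
--     return out
-- ===== Notes on version B (the rewrite author's own statement) =====
-- stated objective: idiomatic
-- what changed: Replaces the find-and-resume while loop (stateful posHit/posStart) with a single comprehension that tests startswith at every index 0..len(seq) and appends the trailing -1 once.
import Mathlib
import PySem

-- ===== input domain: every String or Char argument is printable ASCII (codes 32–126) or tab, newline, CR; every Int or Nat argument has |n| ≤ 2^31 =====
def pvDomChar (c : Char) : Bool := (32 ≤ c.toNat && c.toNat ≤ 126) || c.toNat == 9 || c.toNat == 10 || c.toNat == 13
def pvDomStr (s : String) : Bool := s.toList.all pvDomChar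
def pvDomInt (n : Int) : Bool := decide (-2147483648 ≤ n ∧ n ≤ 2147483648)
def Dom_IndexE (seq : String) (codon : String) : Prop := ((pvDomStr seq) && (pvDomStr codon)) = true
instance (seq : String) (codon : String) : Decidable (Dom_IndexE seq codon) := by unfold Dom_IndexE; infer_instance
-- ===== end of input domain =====

-- B replaces A's find-and-resume while loop by a single per-index startswith scan (idiomatic, same cost).


-- ===== PORT A =====
-- the while loop of A: posHit = seq.find(codon, posStart+1); append posHit; repeat while posHit >= 0.
-- 'start' is posStart+1 (a Nat: it is 0 initially and posHit+1 with posHit ≥ 0 afterwards).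
-- 'fuel' only makes the recursion structural; with fuel = len(seq)+1 the 0-branch is never reached,
-- because each successful find returns a strictly larger position ≤ len(seq).
def loopA (s c : List Char) (start : Nat) (fuel : Nat) : List Int :=
  let p := PySem.Chars.findFrom s c (start : Int) none
  if p < 0 then [p]
  else
    match fuel with
    | 0 => []
    | f + 1 => p :: loopA s c (p.toNat + 1) f

def IndexE (seq : String) (codon : String) : List Int :=
  loopA seq.toList codon.toList 0 (seq.toList.length + 1)

-- ===== PORT B =====
-- seq.startswith(codon, i) for 0 ≤ i ≤ len(seq) is exactly 'codon is a prefix of seq[i:]'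
def IndexE_alt (seq : String) (codon : String) : List Int :=
  ((List.range (seq.toList.length + 1)).filter
      (fun i => codon.toList.isPrefixOf (seq.toList.drop i))).map (fun i => ((i : Nat) : Int))
    ++ [-1]

-- ===== PRECONDITION & SPEC =====
def Spec_IndexE (seq : String) (codon : String) (out : List Int) : Prop := out = IndexE_alt seq codon
instance (seq : String) (codon : String) (out : List Int) : Decidable (Spec_IndexE seq codon out) := by unfold Spec_IndexE; infer_instance

-- ===== CLAIM (what is proved, stated in full; the proofs are below) =====
def Claim_equal_IndexE : Prop := ∀ (seq : String) (codon : String), Dom_IndexE seq codon → Spec_IndexE seq codon (IndexE seq codon)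

-- ===== LEMMAS AND PROOFS =====

-- Python quirk kept by PySem: find with a start past len(s) is -1 even for the empty needle
theorem findFrom_of_gt (s c : List Char) (k : Nat) (hk : s.length < k) :
    PySem.Chars.findFrom s c (k : Int) none = -1 := by
  simp [PySem.Chars.findFrom]; omega

-- a successful find from position k lands in [k, len s]
theorem findFrom_bound (s c : List Char) (k : Nat)
    (h : ¬ PySem.Chars.findFrom s c (k : Int) none < 0) :
    k ≤ (PySem.Chars.findFrom s c (k : Int) none).toNat ∧
      (PySem.Chars.findFrom s c (k : Int) none).toNat ≤ s.length := by
  have hk : k ≤ s.length := by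
    by_contra hk
    exact h (by rw [findFrom_of_gt s c k (by omega)]; decide)
  rw [PySem.Chars.findFrom_natCast s c k hk] at h ⊢
  split at h
  · omega
  · rename_i hf
    have h1 := PySem.Chars.neg_one_le_find (s.drop k) c
    have h2 := PySem.Chars.find_le_length (s.drop k) c
    simp only [List.length_drop] at h2
    split <;> omega

-- a prefix at position i ≥ start is an infix of s.drop start
theorem prefix_drop_infix (s c : List Char) (start i : Nat) (hsi : start ≤ i)
    (hc : c <+: s.drop i) : c <:+: s.drop start := by
  have : s.drop i = (s.drop start).drop (i - start) := by
    rw [List.drop_drop]; congr 1; omega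
  rw [this] at hc
  exact hc.isInfix.trans (List.drop_suffix _ _).isInfix

theorem loopA_eq (s c : List Char) (fuel : Nat) : ∀ (start : Nat),
    s.length + 1 - start ≤ fuel →
    loopA s c start fuel =
      ((List.range' start (s.length + 1 - start)).filter
          (fun i => c.isPrefixOf (s.drop i))).map (fun i => ((i : Nat) : Int)) ++ [-1] := by
  induction fuel with
  | zero =>
    intro start h
    have hk : s.length < start := by omega
    have h1 : PySem.Chars.findFrom s c (start : Int) none = -1 := findFrom_of_gt s c start hk
    have h2 : s.length + 1 - start = 0 := by omega
    rw [loopA]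
    simp [h1, h2]
  | succ f ih =>
    intro start h
    rw [loopA]
    by_cases hk : s.length < start
    · -- start past the end: find is -1 and the range is empty
      have h1 : PySem.Chars.findFrom s c (start : Int) none = -1 := findFrom_of_gt s c start hk
      have h2 : s.length + 1 - start = 0 := by omega
      simp [h1, h2]
    · rw [not_lt] at hk
      by_cases hp : PySem.Chars.findFrom s c (start : Int) none < 0
      · -- no further occurrence: every position in [start, len] fails the prefix test
        have hm1 : PySem.Chars.findFrom s c (start : Int) none = -1 := by
          rw [PySem.Chars.findFrom_natCast s c start hk] at hp ⊢
          split at hp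
          · rename_i hf; rw [if_pos hf]
          · have := PySem.Chars.neg_one_le_find (s.drop start) c; omega
        have hno : ¬ c <:+: s.drop start :=
          (PySem.Chars.findFrom_natCast_eq_neg_one_iff s c start hk).mp hm1
        have hfil : (List.range' start (s.length + 1 - start)).filter
            (fun i => c.isPrefixOf (s.drop i)) = [] := by
          apply List.filter_eq_nil_iff.mpr
          intro i hi hpre
          have hsi : start ≤ i := (List.mem_range'_1.mp hi).1
          exact hno (prefix_drop_infix s c start i hsi (List.isPrefixOf_iff_prefix.mp hpre))
        rw [hfil]
        simp [hm1]
      · -- an occurrence at q := findFrom …; positions start..q-1 fail, q succeeds, recurse from q+1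
        have hspec := PySem.Chars.findFrom_natCast_spec s c start hk
          (by intro h0; rw [h0] at hp; exact hp (by decide))
        have hbnd := findFrom_bound s c start hp
        set p := PySem.Chars.findFrom s c (start : Int) none with hpdef
        set q := p.toNat with hqdef
        obtain ⟨hle, hpre, hmin⟩ := hspec
        obtain ⟨hsq, hql⟩ := hbnd
        have hsplit : s.length + 1 - start = (q - start) + (s.length + 1 - q) := by omega
        rw [hsplit, ← List.range'_append (s := start) (m := q - start) (n := s.length + 1 - q) (step := 1)]
        have hqeq : start + 1 * (q - start) = q := by omega
        rw [hqeq]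
        have hfil1 : (List.range' start (q - start)).filter (fun i => c.isPrefixOf (s.drop i)) = [] := by
          apply List.filter_eq_nil_iff.mpr
          intro i hi
          have hmem := List.mem_range'_1.mp hi
          intro hpre'
          exact hmin i hmem.1 (by omega) (List.isPrefixOf_iff_prefix.mp hpre')
        have hsucc : s.length + 1 - q = (s.length + 1 - (q + 1)) + 1 := by omega
        rw [List.filter_append, hfil1, hsucc, List.range'_succ]
        have hq1 : c.isPrefixOf (s.drop q) = true := List.isPrefixOf_iff_prefix.mpr hpre
        rw [List.filter_cons_of_pos (by exact hq1)]
        rw [if_neg hp]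
        rw [ih (q + 1) (by omega)]
        have hpq : p = ((q : Nat) : Int) := by
          rw [hqdef, Int.toNat_of_nonneg (by omega)]
        simp [hpq]

-- ===== VERDICT (by name: the statement is the Claim_ definition above) =====
theorem IndexE_spec : Claim_equal_IndexE := by
  intro seq codon _
  unfold Spec_IndexE IndexE IndexE_alt
  rw [loopA_eq seq.toList codon.toList (seq.toList.length + 1) 0 (by omega)]
  simp [List.range_eq_range']
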